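-- pv_equiv track=rewrite | github.com/mantidproject/mantid | Code/Mantid/Build/cmakelists_utils.py | redo_cmake_section
-- ===== SOURCE A (Python) =====
-- def redo_cmake_section(lines, cmake_tag, add_this_line, remove_this_line=""):
--     """ Read the LINES of a file. Find "set ( cmake_tag",
--     read all the lines to get all the files,
--     add your new line,
--     sort them,
--     rewrite. Yay!"""
--
--     search_for1 = "set ( %s" % cmake_tag
--     search_for2 = "set (%s" % cmake_tag
--     # List of files in the thingie
--     files = []
--     lines_before = []
--     lines_after = []
--     section_num = 0
--     for line in lines:
--         if line.strip().startswith(search_for1): section_num = 1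
--         if line.strip().startswith(search_for2): section_num = 1
--
--         if section_num == 0:
--             # These are the lines before
--             lines_before.append(line)
--         elif section_num == 1:
--             #this is a line with the name of a file
--             line = line.strip()
--             # Take off the tag
--             if line.startswith(search_for1): line = line[len(search_for1):].strip()
--             if line.startswith(search_for2): line = line[len(search_for2):].strip()
--             # Did we reach the last one?
--             if line.endswith(")"):
--                 section_num = 2
--                 line = line[0:len(line) - 1].strip()
--
--             if len(line) > 0:
--                 files.append(line)
--         else:
--             # These are lines after
--             lines_after.append(line)
--
--     # Add the new file to the list of files
--     if len(add_this_line) > 0: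
--         files.append(add_this_line)
--     # Use a set to keep only unique linese
--     files = set(files)
--
--     # Remove an entry from the cmake list
--     try:
--         if len(remove_this_line) > 0:
--             files.remove(remove_this_line)
--     except:
--         # Ignore missing entry.
--         pass
--
--     files = list(files)
--     # Sort-em alphabetically
--     files.sort()
--
--     lines = lines_before
--     lines.append("set ( %s" % cmake_tag)
--     for file in files:
--         lines.append("\t" + file)
--     lines.append(")") # close the parentheses
--     lines += lines_after
--
--     return lines
-- ===== SOURCE B (Python) =====
-- def redo_cmake_section(lines, cmake_tag, add_this_line, remove_this_line=""):
--     """Label-then-group rewrite: one pass computes a phase label (0 before /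
--     1 section / 2 after) per line; separate comprehensions then group the lines
--     and extract the file names, which go through a set and sorted()."""
--     pat1 = "set ( %s" % cmake_tag
--     pat2 = "set (%s" % cmake_tag
--
--     def entry(line):
--         s = line.strip()
--         if s.startswith(pat1):
--             s = s[len(pat1):].strip()
--         if s.startswith(pat2):
--             s = s[len(pat2):].strip()
--         return s
--
--     # labeling pass: phase of each line
--     ph = []
--     st = 0
--     for l in lines:
--         d = 1 if (l.strip().startswith(pat1) or l.strip().startswith(pat2)) else st
--         st = 2 if (d == 1 and entry(l).endswith(")")) else d
--         ph.append(d)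
--
--     before = [l for l, p in zip(lines, ph) if p == 0]
--     after = [l for l, p in zip(lines, ph) if p == 2]
--
--     def extract(e):
--         return e[:-1].strip() if e.endswith(")") else e
--
--     names = [extract(entry(l)) for l, p in zip(lines, ph) if p == 1]
--     files = set(n for n in names if n)
--     if add_this_line:
--         files.add(add_this_line)
--     if remove_this_line:
--         files.discard(remove_this_line)
--
--     return (before + ["set ( %s" % cmake_tag]
--             + ["\t" + f for f in sorted(files)]
--             + [")"] + after)
-- ===== Notes on version B (the rewrite author's own statement) =====
-- stated objective: alternative
-- what changed: Replaces A's interleaved state machine that maintains three output lists while scanning with a label-then-group design: one pass assigns each line a phase label (0 before / 1 section / 2 after), then independent grouping passes (filters over the line/label pairs) build the before/after blocks and extract the file names into a set.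
import Mathlib
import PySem

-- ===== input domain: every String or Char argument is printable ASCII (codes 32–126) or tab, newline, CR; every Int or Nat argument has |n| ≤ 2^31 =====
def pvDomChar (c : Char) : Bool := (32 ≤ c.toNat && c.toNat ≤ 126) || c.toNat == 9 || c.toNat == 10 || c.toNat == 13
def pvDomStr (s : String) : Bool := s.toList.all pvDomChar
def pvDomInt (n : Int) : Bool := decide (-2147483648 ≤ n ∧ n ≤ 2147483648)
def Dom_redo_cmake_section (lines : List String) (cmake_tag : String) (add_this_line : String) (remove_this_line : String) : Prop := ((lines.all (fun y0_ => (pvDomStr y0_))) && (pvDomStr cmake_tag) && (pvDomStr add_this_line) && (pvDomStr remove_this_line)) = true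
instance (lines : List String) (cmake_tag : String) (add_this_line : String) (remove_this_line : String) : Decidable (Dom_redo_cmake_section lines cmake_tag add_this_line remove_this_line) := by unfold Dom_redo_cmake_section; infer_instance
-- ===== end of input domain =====

-- B replaces A's interleaved three-list state machine by a label-then-group design:
-- one pass labels each line with a phase, separate grouping passes then build the
-- output pieces (objective: alternative); return values proved equal on the whole domain.

-- ===== PORT A =====
-- the state-machine for loop of A, ported as structural recursion over the same state
-- (section_num, lines_before, files, lines_after)
def pvLoopA (p1 p2 : String) : List String → Nat → List String → List String → List String → List String × List String × List String
  | [], _, lb, fs, la => (lb, fs, la)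
  | l :: rest, sn, lb, fs, la =>
    let sn := if PySem.Str.startswith (PySem.Str.strip l) p1 then 1 else sn
    let sn := if PySem.Str.startswith (PySem.Str.strip l) p2 then 1 else sn
    if sn == 0 then
      pvLoopA p1 p2 rest sn (lb ++ [l]) fs la
    else if sn == 1 then
      let s := PySem.Str.strip l
      let s := if PySem.Str.startswith s p1 then PySem.Str.strip (PySem.Str.slice s (some (PySem.Str.len p1 : Int)) none) else s
      let s := if PySem.Str.startswith s p2 then PySem.Str.strip (PySem.Str.slice s (some (PySem.Str.len p2 : Int)) none) else s
      if PySem.Str.endswith s ")" then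
        let s := PySem.Str.strip (PySem.Str.slice s (some 0) (some ((PySem.Str.len s : Int) - 1)))
        pvLoopA p1 p2 rest 2 lb (fs ++ (if PySem.Str.len s > 0 then [s] else [])) la
      else
        pvLoopA p1 p2 rest 1 lb (fs ++ (if PySem.Str.len s > 0 then [s] else [])) la
    else
      pvLoopA p1 p2 rest sn lb fs (la ++ [l])

def redo_cmake_section (lines : List String) (cmake_tag : String) (add_this_line : String) (remove_this_line : String) : List String :=
  let p1 := "set ( " ++ cmake_tag
  let p2 := "set (" ++ cmake_tag
  let r := pvLoopA p1 p2 lines 0 [] [] []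
  let lb := r.1
  let fs := r.2.1
  let la := r.2.2
  let fs := if PySem.Str.len add_this_line > 0 then fs ++ [add_this_line] else fs
  let st : PySem.Set String := PySem.Set.ofList fs
  let st := if PySem.Str.len remove_this_line > 0 then PySem.Set.discard st remove_this_line else st
  let srt := PySem.List.sorted st (fun x => x) false
  lb ++ ["set ( " ++ cmake_tag] ++ srt.map (fun f => "\t" ++ f) ++ [")"] ++ la

-- ===== PORT B =====
def pvIsStart (p1 p2 l : String) : Bool :=
  PySem.Str.startswith (PySem.Str.strip l) p1 || PySem.Str.startswith (PySem.Str.strip l) p2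

-- B's helper entry(line): the line with the tag stripped off
def pvEntry (p1 p2 l : String) : String :=
  let s := PySem.Str.strip l
  let s := if PySem.Str.startswith s p1 then PySem.Str.strip (PySem.Str.slice s (some (PySem.Str.len p1 : Int)) none) else s
  if PySem.Str.startswith s p2 then PySem.Str.strip (PySem.Str.slice s (some (PySem.Str.len p2 : Int)) none) else s

-- B's helper extract(e)
def pvExtract (e : String) : String :=
  if PySem.Str.endswith e ")" then PySem.Str.strip (PySem.Str.slice e none (some (-1))) else e

-- B's labeling pass: the phase (0 before / 1 section / 2 after) of each line
def pvPh (p1 p2 : String) : Nat → List String → List Nat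
  | _, [] => []
  | st, l :: rest =>
    let d := if pvIsStart p1 p2 l then 1 else st
    d :: pvPh p1 p2 (if d == 1 && PySem.Str.endswith (pvEntry p1 p2 l) ")" then 2 else d) rest

def redo_cmake_section_alt (lines : List String) (cmake_tag : String) (add_this_line : String) (remove_this_line : String) : List String :=
  let p1 := "set ( " ++ cmake_tag
  let p2 := "set (" ++ cmake_tag
  let ann := lines.zip (pvPh p1 p2 0 lines)
  let before := (ann.filter (fun x => x.2 == 0)).map (fun x => x.1)
  let after := (ann.filter (fun x => x.2 == 2)).map (fun x => x.1)
  let names := (ann.filter (fun x => x.2 == 1)).map (fun x => pvExtract (pvEntry p1 p2 x.1))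
  let es : PySem.Set String := PySem.Set.ofList (names.filter (fun n => PySem.Str.len n > 0))
  let es := if PySem.Str.len add_this_line > 0 then PySem.Set.add es add_this_line else es
  let es := if PySem.Str.len remove_this_line > 0 then PySem.Set.discard es remove_this_line else es
  before ++ ["set ( " ++ cmake_tag] ++ (PySem.List.sorted es (fun x => x) false).map (fun f => "\t" ++ f) ++ [")"] ++ after

-- ===== PRECONDITION & SPEC =====
def Spec_redo_cmake_section (lines : List String) (cmake_tag : String) (add_this_line : String) (remove_this_line : String) (out : List String) : Prop := out = redo_cmake_section_alt lines cmake_tag add_this_line remove_this_line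
instance (lines : List String) (cmake_tag : String) (add_this_line : String) (remove_this_line : String) (out : List String) : Decidable (Spec_redo_cmake_section lines cmake_tag add_this_line remove_this_line out) := by unfold Spec_redo_cmake_section; infer_instance

-- ===== CLAIM (what is proved, stated in full; the proofs are below) =====
def Claim_equal_redo_cmake_section : Prop := ∀ (lines : List String) (cmake_tag : String) (add_this_line : String) (remove_this_line : String), Dom_redo_cmake_section lines cmake_tag add_this_line remove_this_line → Spec_redo_cmake_section lines cmake_tag add_this_line remove_this_line (redo_cmake_section lines cmake_tag add_this_line remove_this_line)

-- ===== LEMMAS AND PROOFS =====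

-- the two slice spellings s[0:len(s)-1] and s[:-1] agree on the nonempty strings the ')' branch reaches
theorem pv_slice_eq (s : String) (he : PySem.Str.endswith s ")" = true) :
    PySem.Str.strip (PySem.Str.slice s (some 0) (some ((PySem.Str.len s : Int) - 1))) =
    PySem.Str.strip (PySem.Str.slice s none (some (-1))) := by
  have hsuf : (")".toList) <:+ s.toList := by
    rw [PySem.Str.endswith_eq] at he
    exact (PySem.Chars.endswith_iff _ _).mp he
  have hlen : 1 ≤ s.length := by
    rcases hsuf with ⟨t, ht⟩
    have := congrArg List.length ht
    simp at this
    omega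
  have h1 : ((PySem.Str.len s : Int) - 1) = ((s.length - 1 : Nat) : Int) := by
    rw [PySem.Str.len_eq]
    simp only [String.length_toList]
    omega
  have h2 : PySem.Str.slice s (some 0) (some ((PySem.Str.len s : Int) - 1)) = PySem.Str.slice s none (some (-1)) := by
    unfold PySem.Str.slice
    rw [h1]
    simp only [PySem.Chars.slice_eq_listSlice, PySem.List.slice_zero_start, PySem.List.slice_to_natCast, PySem.List.slice_to_neg_one]
    rw [List.dropLast_eq_take, String.length_toList]
  rw [h2]

-- shorthand for the three grouping passes of B applied to a labeled suffix
def pvGrp (p1 p2 : String) (sn : Nat) (xs : List String) : List String × List String × List String :=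
  let ann := xs.zip (pvPh p1 p2 sn xs)
  ((ann.filter (fun x => x.2 == 0)).map (fun x => x.1),
   ((ann.filter (fun x => x.2 == 1)).map (fun x => pvExtract (pvEntry p1 p2 x.1))).filter (fun n => PySem.Str.len n > 0),
   (ann.filter (fun x => x.2 == 2)).map (fun x => x.1))

-- one close-branch entry of A, rewritten through B's pvExtract
theorem pv_entry_close (e : String) (hcl : PySem.Str.endswith e ")" = true) :
    PySem.Str.strip (PySem.Str.slice e (some 0) (some ((PySem.Str.len e : Int) - 1))) = pvExtract e := by
  rw [pvExtract, if_pos hcl, pv_slice_eq e hcl]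

-- one step of A's loop with its section-line computation folded into pvEntry (definitional)
theorem pvLoopA_cons_eq (p1 p2 l : String) (rest : List String) (sn : Nat) (lb fs la : List String) :
    pvLoopA p1 p2 (l :: rest) sn lb fs la =
      (if (if PySem.Str.startswith (PySem.Str.strip l) p2 then 1 else if PySem.Str.startswith (PySem.Str.strip l) p1 then 1 else sn) == 0 then
         pvLoopA p1 p2 rest (if PySem.Str.startswith (PySem.Str.strip l) p2 then 1 else if PySem.Str.startswith (PySem.Str.strip l) p1 then 1 else sn) (lb ++ [l]) fs la
       else if (if PySem.Str.startswith (PySem.Str.strip l) p2 then 1 else if PySem.Str.startswith (PySem.Str.strip l) p1 then 1 else sn) == 1 then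
         (if PySem.Str.endswith (pvEntry p1 p2 l) ")" then
            pvLoopA p1 p2 rest 2 lb (fs ++ (if PySem.Str.len (PySem.Str.strip (PySem.Str.slice (pvEntry p1 p2 l) (some 0) (some ((PySem.Str.len (pvEntry p1 p2 l) : Int) - 1)))) > 0 then [PySem.Str.strip (PySem.Str.slice (pvEntry p1 p2 l) (some 0) (some ((PySem.Str.len (pvEntry p1 p2 l) : Int) - 1)))] else [])) la
          else
            pvLoopA p1 p2 rest 1 lb (fs ++ (if PySem.Str.len (pvEntry p1 p2 l) > 0 then [pvEntry p1 p2 l] else [])) la)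
       else
         pvLoopA p1 p2 rest (if PySem.Str.startswith (PySem.Str.strip l) p2 then 1 else if PySem.Str.startswith (PySem.Str.strip l) p1 then 1 else sn) lb fs (la ++ [l])) := rfl

-- one step of B's labeling pass (definitional)
theorem pvPh_cons (p1 p2 : String) (st : Nat) (l : String) (rest : List String) :
    pvPh p1 p2 st (l :: rest) =
      (if pvIsStart p1 p2 l then 1 else st) ::
        pvPh p1 p2 (if ((if pvIsStart p1 p2 l then 1 else st) == 1 && PySem.Str.endswith (pvEntry p1 p2 l) ")") then 2 else (if pvIsStart p1 p2 l then 1 else st)) rest := rfl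

-- A's double state update folds to one test of pvIsStart
theorem pv_snfold (p1 p2 l : String) (sn : Nat) :
    (if PySem.Str.startswith (PySem.Str.strip l) p2 then 1 else if PySem.Str.startswith (PySem.Str.strip l) p1 then 1 else sn) = (if pvIsStart p1 p2 l then 1 else sn) := by
  cases hb1 : PySem.Str.startswith (PySem.Str.strip l) p1 <;>
    cases hb2 : PySem.Str.startswith (PySem.Str.strip l) p2 <;>
      rw [pvIsStart, hb1, hb2] <;> simp

theorem pvLoopA_step0 (p1 p2 l : String) (rest lb fs la : List String) (hst : pvIsStart p1 p2 l = false) :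
    pvLoopA p1 p2 (l :: rest) 0 lb fs la = pvLoopA p1 p2 rest 0 (lb ++ [l]) fs la := by
  rw [pvLoopA_cons_eq, pv_snfold, hst]
  simp

theorem pvLoopA_step2 (p1 p2 l : String) (rest lb fs la : List String) (hst : pvIsStart p1 p2 l = false) :
    pvLoopA p1 p2 (l :: rest) 2 lb fs la = pvLoopA p1 p2 rest 2 lb fs (la ++ [l]) := by
  rw [pvLoopA_cons_eq, pv_snfold, hst]
  simp

theorem pvLoopA_step1_open (p1 p2 l : String) (rest lb fs la : List String) (sn : Nat)
    (hd : (if pvIsStart p1 p2 l then 1 else sn) = 1)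
    (hcl : PySem.Str.endswith (pvEntry p1 p2 l) ")" = false) :
    pvLoopA p1 p2 (l :: rest) sn lb fs la =
      pvLoopA p1 p2 rest 1 lb (fs ++ (if PySem.Str.len (pvEntry p1 p2 l) > 0 then [pvEntry p1 p2 l] else [])) la := by
  rw [pvLoopA_cons_eq, pv_snfold, hd, hcl]
  simp

theorem pvLoopA_step1_close (p1 p2 l : String) (rest lb fs la : List String) (sn : Nat)
    (hd : (if pvIsStart p1 p2 l then 1 else sn) = 1)
    (hcl : PySem.Str.endswith (pvEntry p1 p2 l) ")" = true) :
    pvLoopA p1 p2 (l :: rest) sn lb fs la =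
      pvLoopA p1 p2 rest 2 lb (fs ++ (if PySem.Str.len (pvExtract (pvEntry p1 p2 l)) > 0 then [pvExtract (pvEntry p1 p2 l)] else [])) la := by
  rw [pvLoopA_cons_eq, pv_snfold, hd, hcl, pv_entry_close _ hcl]
  simp

-- how B's grouping behaves on one labeled line, per phase
theorem pvGrp_cons0 (p1 p2 l : String) (rest : List String) (hst : pvIsStart p1 p2 l = false) :
    pvGrp p1 p2 0 (l :: rest) =
      (l :: (pvGrp p1 p2 0 rest).1, (pvGrp p1 p2 0 rest).2.1, (pvGrp p1 p2 0 rest).2.2) := by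
  simp only [pvGrp, pvPh_cons, hst]
  simp

theorem pvGrp_cons2 (p1 p2 l : String) (rest : List String) (hst : pvIsStart p1 p2 l = false) :
    pvGrp p1 p2 2 (l :: rest) =
      ((pvGrp p1 p2 2 rest).1, (pvGrp p1 p2 2 rest).2.1, l :: (pvGrp p1 p2 2 rest).2.2) := by
  simp only [pvGrp, pvPh_cons, hst]
  simp

theorem pvGrp_cons1_open (p1 p2 l : String) (rest : List String) (sn : Nat)
    (hd : (if pvIsStart p1 p2 l then 1 else sn) = 1)
    (hcl : PySem.Str.endswith (pvEntry p1 p2 l) ")" = false) :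
    pvGrp p1 p2 sn (l :: rest) =
      ((pvGrp p1 p2 1 rest).1,
       (if PySem.Str.len (pvEntry p1 p2 l) > 0 then [pvEntry p1 p2 l] else []) ++ (pvGrp p1 p2 1 rest).2.1,
       (pvGrp p1 p2 1 rest).2.2) := by
  have hx : pvExtract (pvEntry p1 p2 l) = pvEntry p1 p2 l := by
    rw [pvExtract, if_neg (by simpa using hcl)]
  simp only [pvGrp, pvPh_cons, hd, hcl]
  simp [hx, List.filter_cons]
  split_ifs <;> simp

theorem pvGrp_cons1_close (p1 p2 l : String) (rest : List String) (sn : Nat)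
    (hd : (if pvIsStart p1 p2 l then 1 else sn) = 1)
    (hcl : PySem.Str.endswith (pvEntry p1 p2 l) ")" = true) :
    pvGrp p1 p2 sn (l :: rest) =
      ((pvGrp p1 p2 2 rest).1,
       (if PySem.Str.len (pvExtract (pvEntry p1 p2 l)) > 0 then [pvExtract (pvEntry p1 p2 l)] else []) ++ (pvGrp p1 p2 2 rest).2.1,
       (pvGrp p1 p2 2 rest).2.2) := by
  simp only [pvGrp, pvPh_cons, hd, hcl]
  simp [List.filter_cons]
  split_ifs <;> simp

set_option maxHeartbeats 800000 in
-- A's state machine run from any reachable state equals B's label-then-group result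
theorem pvLoopA_grp (p1 p2 : String) (xs : List String) :
    ∀ (sn : Nat), (sn = 0 ∨ sn = 1 ∨ sn = 2) → ∀ (lb fs la : List String),
    pvLoopA p1 p2 xs sn lb fs la =
      (lb ++ (pvGrp p1 p2 sn xs).1, fs ++ (pvGrp p1 p2 sn xs).2.1, la ++ (pvGrp p1 p2 sn xs).2.2) := by
  induction xs with
  | nil => intro sn _ lb fs la; simp [pvLoopA, pvGrp, pvPh]
  | cons l rest ih =>
    intro sn hs lb fs la
    by_cases hst : pvIsStart p1 p2 l
    · have hd : (if pvIsStart p1 p2 l then 1 else sn) = 1 := by simp [hst]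
      by_cases hcl : PySem.Str.endswith (pvEntry p1 p2 l) ")"
      · rw [pvLoopA_step1_close p1 p2 l rest lb fs la sn hd hcl,
            pvGrp_cons1_close p1 p2 l rest sn hd hcl, ih 2 (by omega)]
        simp only [List.append_assoc]
      · rw [pvLoopA_step1_open p1 p2 l rest lb fs la sn hd (by simpa using hcl),
            pvGrp_cons1_open p1 p2 l rest sn hd (by simpa using hcl), ih 1 (by omega)]
        simp only [List.append_assoc]
    · have hst' : pvIsStart p1 p2 l = false := by simpa using hst
      rcases hs with h | h | h <;> subst h
      · rw [pvLoopA_step0 p1 p2 l rest lb fs la hst', pvGrp_cons0 p1 p2 l rest hst',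
            ih 0 (by omega)]
        simp only [List.append_assoc, List.singleton_append]
      · have hd : (if pvIsStart p1 p2 l then 1 else 1) = 1 := by simp
        by_cases hcl : PySem.Str.endswith (pvEntry p1 p2 l) ")"
        · rw [pvLoopA_step1_close p1 p2 l rest lb fs la 1 hd hcl,
              pvGrp_cons1_close p1 p2 l rest 1 hd hcl, ih 2 (by omega)]
          simp only [List.append_assoc]
        · rw [pvLoopA_step1_open p1 p2 l rest lb fs la 1 hd (by simpa using hcl),
              pvGrp_cons1_open p1 p2 l rest 1 hd (by simpa using hcl), ih 1 (by omega)]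
          simp only [List.append_assoc]
      · rw [pvLoopA_step2 p1 p2 l rest lb fs la hst', pvGrp_cons2 p1 p2 l rest hst',
            ih 2 (by omega)]
        simp only [List.append_assoc, List.singleton_append]

theorem pvSet_ofList_append_singleton (xs : List String) (x : String) :
    PySem.Set.ofList (xs ++ [x]) = PySem.Set.add (PySem.Set.ofList xs) x := by
  simp [PySem.Set.ofList_eq_foldl, List.foldl_append]

-- ===== VERDICT (by name: the statement is the Claim_ definition above) =====
theorem redo_cmake_section_spec : Claim_equal_redo_cmake_section := by
  intro lines tag add rem _
  unfold Spec_redo_cmake_section redo_cmake_section redo_cmake_section_alt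
  dsimp only
  rw [pvLoopA_grp _ _ lines 0 (by omega) [] [] []]
  simp only [List.nil_append, pvGrp]
  by_cases ha : PySem.Str.len add > 0
  · rw [if_pos ha, if_pos ha, pvSet_ofList_append_singleton]
  · rw [if_neg ha, if_neg ha]
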